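-- pv_equiv track=rewrite | github.com/abrytskyy/PYTHON-Exercises | Full Stack/06.19-1!.py | func
-- ===== SOURCE A (Python) =====
-- def func(a):
--     sum1 = 0
--     mult = 1
--     for i in a:
--         if i >0:
--             sum1 += i
--         else:
--             mult *= i
--
--     return sum1, mult
-- ===== SOURCE B (Python) =====
-- import math
--
-- def func(a):
--     return sum(i for i in a if i > 0), math.prod(i for i in a if i <= 0)
-- ===== Notes on version B (the rewrite author's own statement) =====
-- stated objective: simpler
-- what changed: Replaces the single-pass branching accumulator with two independent filtered library reductions: sum over positives and math.prod over non-positives.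
import Mathlib
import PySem

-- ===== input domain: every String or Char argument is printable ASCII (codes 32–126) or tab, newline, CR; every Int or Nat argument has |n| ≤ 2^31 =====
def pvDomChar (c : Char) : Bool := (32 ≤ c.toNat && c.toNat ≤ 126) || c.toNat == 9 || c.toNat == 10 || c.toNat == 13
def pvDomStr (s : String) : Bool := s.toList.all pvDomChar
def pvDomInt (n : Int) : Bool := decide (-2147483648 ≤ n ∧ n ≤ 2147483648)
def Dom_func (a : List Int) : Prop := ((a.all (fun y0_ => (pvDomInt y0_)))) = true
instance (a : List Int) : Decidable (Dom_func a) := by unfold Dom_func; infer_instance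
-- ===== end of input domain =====

-- B computes the same pair by two independent filtered reductions instead of one branching loop (objective: simpler).
-- ===== PORT A =====
def func (a : List Int) : Int × Int :=
  a.foldl (fun s i => if i > 0 then (s.1 + i, s.2) else (s.1, s.2 * i)) (0, 1)

-- ===== PORT B =====
def func_alt (a : List Int) : Int × Int :=
  ((a.filter (fun i => i > 0)).sum, (a.filter (fun i => i ≤ 0)).prod)

-- ===== PRECONDITION & SPEC =====
def Spec_func (a : List Int) (out : Int × Int) : Prop := out = func_alt a
instance (a : List Int) (out : Int × Int) : Decidable (Spec_func a out) := by unfold Spec_func; infer_instance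

-- ===== CLAIM (what is proved, stated in full; the proofs are below) =====
def Claim_equal_func : Prop := ∀ (a : List Int), Dom_func a → Spec_func a (func a)

-- ===== LEMMAS AND PROOFS =====

-- ===== VERDICT (by name: the statement is the Claim_ definition above) =====
lemma func_fold (a : List Int) (s m : Int) :
    a.foldl (fun s i => if i > 0 then (s.1 + i, s.2) else (s.1, s.2 * i)) (s, m)
      = (s + (a.filter (fun i => i > 0)).sum, m * (a.filter (fun i => i ≤ 0)).prod) := by
  induction a generalizing s m with
  | nil => simp
  | cons x xs ih =>
    simp only [List.foldl_cons, List.filter_cons]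
    by_cases h : x > 0
    · have h2 : ¬ x ≤ 0 := by omega
      simp [h, h2, ih, add_assoc]
    · have h2 : x ≤ 0 := by omega
      simp [h, h2, ih, mul_assoc]

theorem func_spec : Claim_equal_func := by
  intro a _
  unfold Spec_func func func_alt
  simp [func_fold]
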